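-- pv_equiv track=rewrite | github.com/codedbydawn/DataQuest-2026-Caregiver | damb/scoring.py | _resolve_base_feature_name
-- ===== SOURCE A (Python) =====
-- def _resolve_base_feature_name(transformed_name: str, feature_columns: list[str] | tuple[str, ...]) -> str:
--     if transformed_name.startswith("numeric__"):
--         return transformed_name.split("__", 1)[1]
--     remainder = transformed_name.split("__", 1)[1] if "__" in transformed_name else transformed_name
--     for feature in sorted(feature_columns, key=len, reverse=True):
--         if remainder == feature or remainder.startswith(f"{feature}_"):
--             return feature
--     return remainder
-- ===== SOURCE B (Python) =====
-- def _resolve_base_feature_name(transformed_name: str, feature_columns) -> str: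
--     if transformed_name.startswith("numeric__"):
--         return transformed_name.split("__", 1)[1]
--     remainder = transformed_name.split("__", 1)[1] if "__" in transformed_name else transformed_name
--     features = set(feature_columns)
--     for length in range(len(remainder), -1, -1):
--         if length == len(remainder) or remainder[length] == "_":
--             prefix = remainder[:length]
--             if prefix in features:
--                 return prefix
--     return remainder
-- ===== Notes on version B (the rewrite author's own statement) =====
-- stated objective: faster
-- what changed: Instead of sorting all features by length and scanning them with a startswith test per feature, B builds a set of the features once and probes the remainder's underscore-bounded prefixes from longest to shortest, returning the first one in the set.
import Mathlib
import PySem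

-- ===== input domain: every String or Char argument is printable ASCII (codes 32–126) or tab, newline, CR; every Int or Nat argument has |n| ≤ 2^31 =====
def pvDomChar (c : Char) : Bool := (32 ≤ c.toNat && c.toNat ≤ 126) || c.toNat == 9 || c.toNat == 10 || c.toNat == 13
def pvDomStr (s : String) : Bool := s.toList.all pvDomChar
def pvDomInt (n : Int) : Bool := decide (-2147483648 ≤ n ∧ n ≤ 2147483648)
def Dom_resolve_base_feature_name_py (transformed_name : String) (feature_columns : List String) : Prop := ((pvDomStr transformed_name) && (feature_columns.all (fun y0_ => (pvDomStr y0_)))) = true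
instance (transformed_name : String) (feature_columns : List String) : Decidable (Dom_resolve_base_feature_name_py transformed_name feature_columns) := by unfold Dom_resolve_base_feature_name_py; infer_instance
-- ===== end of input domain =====

-- B replaces A's sort-then-scan over the features with a feature set probed at the
-- remainder's underscore-bounded prefixes, longest first (objective: faster).

-- ===== PORT A =====
-- the for-loop over sorted(feature_columns, key=len, reverse=True)
def pvALoop (remainder : String) : List String → String
  | [] => remainder
  | f :: rest =>
      if remainder == f || PySem.Str.startswith remainder (f ++ "_") then f
      else pvALoop remainder rest

def resolve_base_feature_name_py (transformed_name : String) (feature_columns : List String) : String :=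
  if PySem.Str.startswith transformed_name "numeric__" then
    -- split("__", 1)[1]: index 1 always exists here since "numeric__" guarantees "__" occurs
    PySem.List.pyGetD ((PySem.Str.splitMax? transformed_name "__" 1).getD []) 1 ""
  else
    let remainder :=
      if PySem.Str.isIn "__" transformed_name then
        PySem.List.pyGetD ((PySem.Str.splitMax? transformed_name "__" 1).getD []) 1 ""
      else transformed_name
    pvALoop remainder (PySem.List.sorted feature_columns (fun s => PySem.Str.len s) true)

-- ===== PORT B =====
-- one probe of Source B's loop body at a given prefix length
def pvBStep (r : List Char) (features : List String) (length : Nat) : Option String :=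
  if (length == r.length || r[length]? == some '_')
      && features.contains (String.ofList (r.take length)) then
    some (String.ofList (r.take length))
  else none

-- the for-loop over range(len(remainder), -1, -1)
def pvBProbe (r : List Char) (features : List String) : Nat → String
  | 0 => match pvBStep r features 0 with
         | some p => p
         | none => String.ofList r
  | (l+1) => match pvBStep r features (l+1) with
             | some p => p
             | none => pvBProbe r features l

def resolve_base_feature_name_py_alt (transformed_name : String) (feature_columns : List String) : String :=
  if PySem.Str.startswith transformed_name "numeric__" then
    PySem.List.pyGetD ((PySem.Str.splitMax? transformed_name "__" 1).getD []) 1 ""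
  else
    let remainder :=
      if PySem.Str.isIn "__" transformed_name then
        PySem.List.pyGetD ((PySem.Str.splitMax? transformed_name "__" 1).getD []) 1 ""
      else transformed_name
    pvBProbe remainder.toList (PySem.Set.ofList feature_columns) remainder.toList.length

-- ===== PRECONDITION & SPEC =====
def Spec_resolve_base_feature_name_py (transformed_name : String) (feature_columns : List String) (out : String) : Prop := out = resolve_base_feature_name_py_alt transformed_name feature_columns
instance (transformed_name : String) (feature_columns : List String) (out : String) : Decidable (Spec_resolve_base_feature_name_py transformed_name feature_columns out) := by unfold Spec_resolve_base_feature_name_py; infer_instance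

-- ===== CLAIM (what is proved, stated in full; the proofs are below) =====
def Claim_equal_resolve_base_feature_name_py : Prop := ∀ (transformed_name : String) (feature_columns : List String), Dom_resolve_base_feature_name_py transformed_name feature_columns → Spec_resolve_base_feature_name_py transformed_name feature_columns (resolve_base_feature_name_py transformed_name feature_columns)

-- ===== LEMMAS AND PROOFS =====

-- A's loop test holds iff the remainder equals the feature or extends it at an underscore
theorem pvCond_iff (rem f : String) :
    (rem == f || PySem.Str.startswith rem (f ++ "_")) = true
      ↔ (rem.toList = f.toList ∨ f.toList ++ ['_'] <+: rem.toList) := by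
  rw [Bool.or_eq_true, beq_iff_eq]
  rw [show PySem.Str.startswith rem (f ++ "_") = PySem.Chars.startswith rem.toList (f.toList ++ ['_']) by simp]
  rw [PySem.Chars.startswith_iff]
  constructor
  · rintro (rfl | h); exacts [Or.inl rfl, Or.inr h]
  · rintro (h | h); exacts [Or.inl (String.toList_inj.mp h), Or.inr h]

-- … and that is exactly "f is the prefix of length |f| and |f| is an underscore boundary"
theorem pvMatch_iff (r f : List Char) :
    (r = f ∨ f ++ ['_'] <+: r)
      ↔ (f = r.take f.length ∧ (f.length = r.length ∨ r[f.length]? = some '_')) := by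
  constructor
  · rintro (rfl | ⟨t, ht⟩)
    · simp
    · subst ht
      rw [List.append_assoc]
      refine ⟨by simp, Or.inr ?_⟩
      rw [List.getElem?_append_right (le_refl _)]
      simp
  · rintro ⟨hf, hlen | hget⟩
    · left; rw [hf, hlen, List.take_length]
    · right
      have hlt : f.length < r.length := by
        by_contra h
        rw [List.getElem?_eq_none (by omega)] at hget
        simp at hget
      have h1 : r.drop f.length = '_' :: r.drop (f.length + 1) := by
        rw [List.drop_eq_getElem_cons hlt]
        rw [List.getElem?_eq_getElem hlt] at hget
        rw [Option.some_inj.mp hget]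
      have h2 : r = r.take f.length ++ r.drop f.length := (List.take_append_drop _ _).symm
      rw [← hf, h1] at h2
      exact ⟨r.drop (f.length + 1), by rw [List.append_assoc, List.singleton_append]; exact h2.symm⟩

theorem pvALoop_eq_find? (rem : String) (ys : List String) :
    pvALoop rem ys
      = ((ys.find? (fun f => rem == f || PySem.Str.startswith rem (f ++ "_"))).getD rem) := by
  induction ys with
  | nil => rfl
  | cons f rest ih =>
      rw [pvALoop, List.find?]
      cases h : (rem == f || PySem.Str.startswith rem (f ++ "_"))
      · simpa using ih
      · simp

theorem pvProbe_of_none (r : List Char) (s : List String) (L : Nat)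
    (h : ∀ L' ≤ L, pvBStep r s L' = none) : pvBProbe r s L = String.ofList r := by
  induction L with
  | zero => rw [pvBProbe, h 0 (le_refl _)]
  | succ l ih => rw [pvBProbe, h (l+1) (le_refl _)]; exact ih (fun L' hL' => h L' (by omega))

theorem pvProbe_of_hit (r : List Char) (s : List String) (L₀ : Nat) (p : String)
    (h0 : pvBStep r s L₀ = some p) :
    ∀ L, L₀ ≤ L → (∀ L', L₀ < L' → L' ≤ L → pvBStep r s L' = none) →
      pvBProbe r s L = p := by
  intro L
  induction L with
  | zero => intro hle _; interval_cases L₀; rw [pvBProbe, h0]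
  | succ l ih =>
      intro hle hnone
      by_cases h : L₀ = l + 1
      · subst h; rw [pvBProbe, h0]
      · rw [pvBProbe, hnone (l+1) (by omega) (le_refl _)]
        exact ih (by omega) (fun L' h1 h2 => hnone L' h1 (by omega))

theorem pvStep_some_of (rem f : String) (fc : List String)
    (hmem : f ∈ fc) (hP : (rem == f || PySem.Str.startswith rem (f ++ "_")) = true) :
    pvBStep rem.toList (PySem.Set.ofList fc) f.toList.length = some f := by
  obtain ⟨htake, hbd⟩ := (pvMatch_iff rem.toList f.toList).mp ((pvCond_iff rem f).mp hP)
  have hofl : String.ofList (rem.toList.take f.toList.length) = f := by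
    rw [← htake]; simp
  have hb : (f.toList.length == rem.toList.length
      || rem.toList[f.toList.length]? == some '_') = true := by
    rcases hbd with h | h <;> rw [h] <;> simp
  unfold pvBStep
  rw [hofl, if_pos]
  simp only [hb, Bool.true_and]
  simp [PySem.Set.mem_ofList, hmem]

theorem pvStep_spec_of_ne_none (rem : String) (fc : List String) (L : Nat)
    (hL : L ≤ rem.toList.length)
    (h : pvBStep rem.toList (PySem.Set.ofList fc) L ≠ none) :
    ∃ f ∈ fc, (rem == f || PySem.Str.startswith rem (f ++ "_")) = true
      ∧ f.toList.length = L
      ∧ pvBStep rem.toList (PySem.Set.ofList fc) L = some f := by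
  have hL' : L ≤ rem.length := by simpa using hL
  have hlen : (String.ofList (rem.toList.take L)).toList.length = L := by
    simp [List.length_take]; omega
  unfold pvBStep at h ⊢
  split at h
  case isFalse => exact absurd rfl h
  case isTrue hc =>
    rw [Bool.and_eq_true] at hc
    obtain ⟨hb, hmem⟩ := hc
    refine ⟨String.ofList (rem.toList.take L), ?_, ?_, hlen, ?_⟩
    · have : String.ofList (rem.toList.take L) ∈ PySem.Set.ofList fc := by
        simpa using hmem
      exact (PySem.Set.mem_ofList _ _).mp this
    · apply (pvCond_iff _ _).mpr
      apply (pvMatch_iff rem.toList _).mpr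
      refine ⟨by rw [hlen]; simp, ?_⟩
      rw [hlen]
      rcases (Bool.or_eq_true _ _).mp hb with h' | h'
      · exact Or.inl (by simpa using h')
      · exact Or.inr (by simpa using h')
    · rw [if_pos (by rw [Bool.and_eq_true]; exact ⟨hb, hmem⟩)]

-- A's first match in the length-descending sorted list = B's longest boundary prefix in the set
theorem loop_eq (rem : String) (fc : List String) :
    pvALoop rem (PySem.List.sorted fc (fun s => PySem.Str.len s) true)
      = pvBProbe rem.toList (PySem.Set.ofList fc) rem.toList.length := by
  rw [pvALoop_eq_find?]
  cases hfind : (PySem.List.sorted fc (fun s => PySem.Str.len s) true).find?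
      (fun f => rem == f || PySem.Str.startswith rem (f ++ "_")) with
  | none =>
      have hall : ∀ f ∈ fc, ¬ (rem == f || PySem.Str.startswith rem (f ++ "_")) = true := by
        intro f hf
        have := List.find?_eq_none.mp hfind f ((PySem.List.mem_sorted _ _ _ _).mpr hf)
        simpa using this
      rw [pvProbe_of_none]
      · simp
      · intro L' hL'
        by_contra hne
        obtain ⟨f, hf, hP, -, -⟩ := pvStep_spec_of_ne_none rem fc L' hL' hne
        exact hall f hf hP
  | some f₀ =>
      obtain ⟨hP0, as, bs, hsplit, has⟩ := List.find?_eq_some_iff_append.mp hfind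
      have hmem0 : f₀ ∈ fc := by
        have : f₀ ∈ PySem.List.sorted fc (fun s => PySem.Str.len s) true := by
          rw [hsplit]; simp
        exact (PySem.List.mem_sorted _ _ _ _).mp this
      -- maximality of f₀'s length among matches
      have hmax : ∀ g ∈ fc, (rem == g || PySem.Str.startswith rem (g ++ "_")) = true →
          g.toList.length ≤ f₀.toList.length := by
        intro g hg hPg
        have hpw := PySem.List.sorted_pairwise_rev (xs := fc) (key := fun s => PySem.Str.len s)
        rw [hsplit] at hpw
        obtain ⟨-, hpc, -⟩ := List.pairwise_append.mp hpw
        have hbs : ∀ b ∈ bs, PySem.Str.len b ≤ PySem.Str.len f₀ := (List.pairwise_cons.mp hpc).1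
        have hgmem : g ∈ as ++ f₀ :: bs := by
          rw [← hsplit]; exact (PySem.List.mem_sorted _ _ _ _).mpr hg
        rcases List.mem_append.mp hgmem with h | h
        · exact absurd hPg (by simpa using has g h)
        · rcases List.mem_cons.mp h with h | h
          · subst h; exact le_refl _
          · have := hbs g h; simpa using this
      have hstep0 := pvStep_some_of rem f₀ fc hmem0 hP0
      have hbd := ((pvMatch_iff rem.toList f₀.toList).mp ((pvCond_iff rem f₀).mp hP0)).2
      have hL0 : f₀.toList.length ≤ rem.toList.length := by
        rcases hbd with h | h
        · omega
        · have := (List.getElem?_eq_some_iff.mp h).1; omega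
      rw [pvProbe_of_hit rem.toList (PySem.Set.ofList fc) f₀.toList.length f₀ hstep0
            rem.toList.length hL0 ?_]
      · rfl
      · intro L' h1 h2
        by_contra hne
        obtain ⟨g, hg, hPg, hglen, -⟩ := pvStep_spec_of_ne_none rem fc L' h2 hne
        have := hmax g hg hPg
        omega

-- ===== VERDICT (by name: the statement is the Claim_ definition above) =====
theorem resolve_base_feature_name_py_spec : Claim_equal_resolve_base_feature_name_py := by
  intro tn fc _
  unfold Spec_resolve_base_feature_name_py resolve_base_feature_name_py resolve_base_feature_name_py_alt
  split
  · rfl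
  · exact loop_eq _ fc
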